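-- pv_equiv track=rewrite | github.com/rhyang2021/UNCLE | src/cal_stastics_knowledge-eval.py | get_veracity_labels
-- ===== SOURCE A (Python) =====
-- def get_veracity_labels(data):
--     transposed_data = list(zip(*data))
--     result = []
--
--     for column in transposed_data:
--         if column.count("S") == len(column):
--             result.append("S")
--         else:
--             result.append("NS")
--     return result
-- ===== SOURCE B (Python) =====
-- def get_veracity_labels(data):
--     # Back-to-front fold: merge each row into the label list of the rows below it.
--     labels = None
--     for row in reversed(data):
--         if labels is None:
--             labels = ["S" if x == "S" else "NS" for x in row]
--         else:
--             labels = ["S" if x == "S" and t == "S" else "NS"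
--                       for x, t in zip(row, labels)]
--     return labels if labels is not None else []
-- ===== Notes on version B (the rewrite author's own statement) =====
-- stated objective: alternative
-- what changed: Replaces transpose-then-count-per-column with a right-to-left fold that merges each row pairwise (via zip) into the label list accumulated from the rows below it, never forming columns.
import Mathlib
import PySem

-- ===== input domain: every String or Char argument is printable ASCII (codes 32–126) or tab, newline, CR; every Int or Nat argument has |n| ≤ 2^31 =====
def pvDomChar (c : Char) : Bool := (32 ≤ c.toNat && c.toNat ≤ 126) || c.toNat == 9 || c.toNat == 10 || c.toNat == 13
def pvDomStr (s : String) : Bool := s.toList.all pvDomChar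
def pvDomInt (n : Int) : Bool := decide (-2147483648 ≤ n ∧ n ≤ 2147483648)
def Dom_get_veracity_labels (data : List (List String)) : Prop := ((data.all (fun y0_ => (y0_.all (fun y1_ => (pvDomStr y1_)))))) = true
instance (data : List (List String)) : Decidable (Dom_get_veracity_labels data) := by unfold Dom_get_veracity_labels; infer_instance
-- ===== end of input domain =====

-- B replaces the transpose + per-column count with a right-to-left fold merging each
-- row pairwise into the label list of the rows below it (objective: alternative, same cost).

-- ===== PORT A =====
-- zip(*data): columns 0..n-1 where n = min row length (0 for empty data);
-- each column is that index taken from every row (getD is exact: j < every row's length).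
def pyZipStar (data : List (List String)) : List (List String) :=
  let n : Nat := match data.map List.length with
    | [] => 0
    | x :: xs => xs.foldl min x
  (List.range n).map (fun j => data.map (fun row => row.getD j ""))

def get_veracity_labels (data : List (List String)) : List String :=
  let transposed_data := pyZipStar data
  transposed_data.foldl
    (fun result column =>
      if column.count "S" = column.length then result ++ ["S"] else result ++ ["NS"])
    []

-- ===== PORT B =====
-- 'for row in reversed(data)' with labels : Option (List String), None before the first row
def get_veracity_labels_alt (data : List (List String)) : List String :=
  let labels : Option (List String) := data.reverse.foldl
    (fun acc row =>
      match acc with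
      | none => some (row.map (fun x => if x == "S" then "S" else "NS"))
      | some t => some ((row.zip t).map
          (fun p => if p.1 == "S" && p.2 == "S" then "S" else "NS")))
    none
  labels.getD []

-- ===== PRECONDITION & SPEC =====
def Spec_get_veracity_labels (data : List (List String)) (out : List String) : Prop := out = get_veracity_labels_alt data
instance (data : List (List String)) (out : List String) : Decidable (Spec_get_veracity_labels data out) := by unfold Spec_get_veracity_labels; infer_instance

-- ===== CLAIM (what is proved, stated in full; the proofs are below) =====
def Claim_equal_get_veracity_labels : Prop := ∀ (data : List (List String)), Dom_get_veracity_labels data → Spec_get_veracity_labels data (get_veracity_labels data)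

-- ===== LEMMAS AND PROOFS =====

-- min row length, as computed by A's pyZipStar
def minLen (data : List (List String)) : Nat :=
  match data.map List.length with
  | [] => 0
  | x :: xs => xs.foldl min x

-- the common per-column answer
def colLabel (data : List (List String)) (j : Nat) : String :=
  if data.all (fun row => row.getD j "" == "S") then "S" else "NS"

theorem foldl_min_min (l : List Nat) (a b : Nat) :
    l.foldl min (min a b) = min a (l.foldl min b) := by
  induction l generalizing b with
  | nil => rfl
  | cons x xs ih => simp only [List.foldl_cons, Nat.min_assoc, ih]

theorem minLen_cons_cons (r s : List String) (ss : List (List String)) :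
    minLen (r :: s :: ss) = min r.length (minLen (s :: ss)) := by
  simp only [minLen, List.map_cons, List.foldl_cons, foldl_min_min]

-- A's foldl-append loop is a map
theorem foldl_append_label (l : List (List String)) (acc : List String) :
    l.foldl (fun result column =>
        if List.count "S" column = column.length then result ++ ["S"] else result ++ ["NS"]) acc
      = acc ++ l.map (fun c => if List.count "S" c = c.length then "S" else "NS") := by
  induction l generalizing acc with
  | nil => simp
  | cons x xs ih => simp [List.foldl_cons, ih]; split_ifs <;> simp

-- per-column: count "S" = length iff every entry is "S"
theorem count_eq_length_iff_all (col : List String) :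
    col.count "S" = col.length ↔ col.all (· == "S") = true := by
  rw [List.count_eq_length, List.all_eq_true]
  constructor
  · intro h b hb; simpa using (h b hb).symm
  · intro h b hb; exact (by simpa using h b hb : b = "S").symm

-- A computes the canonical column labels
theorem A_eq (data : List (List String)) :
    get_veracity_labels data = (List.range (minLen data)).map (colLabel data) := by
  unfold get_veracity_labels pyZipStar
  dsimp only
  rw [foldl_append_label, List.nil_append, List.map_map]
  apply List.map_congr_left
  intro j _
  simp only [Function.comp_apply, colLabel]
  have key : (List.count "S" (data.map (fun row => row.getD j "")) =
      (data.map (fun row => row.getD j "")).length)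
      ↔ (data.all (fun row => row.getD j "" == "S") = true) := by
    rw [count_eq_length_iff_all, List.all_map]; rfl
  by_cases hb : data.all (fun row => row.getD j "" == "S") = true
  · rw [if_pos (key.mpr hb), if_pos hb]
  · rw [if_neg (fun hh => hb (key.mp hh)), if_neg hb]

-- B's fold, in foldr form, computes the canonical column labels on nonempty data
theorem B_foldr (data : List (List String)) (h : data ≠ []) :
    data.foldr (fun row acc =>
      match acc with
      | none => some (row.map (fun x => if x == "S" then "S" else "NS"))
      | some t => some ((row.zip t).map
          (fun p => if p.1 == "S" && p.2 == "S" then "S" else "NS"))) none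
    = some ((List.range (minLen data)).map (colLabel data)) := by
  induction data with
  | nil => exact absurd rfl h
  | cons r rs ih =>
    cases rs with
    | nil =>
      simp only [List.foldr]
      congr 1
      apply List.ext_getElem
      · simp [minLen]
      · intro i h1 h2
        simp only [List.getElem_map, List.getElem_range, colLabel, List.all_cons, List.all_nil,
          Bool.and_true]
        have hi : i < r.length := by simpa [minLen] using h2
        rw [List.getD_eq_getElem _ _ hi]
    | cons s ss =>
      rw [List.foldr_cons, ih (by simp)]
      simp only
      congr 1
      apply List.ext_getElem
      · simp [minLen_cons_cons, Nat.min_comm]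
      · intro i h1 h2
        have hlen : i < min r.length (minLen (s :: ss)) := by
          simpa [Nat.lt_min] using h1
        have hir : i < r.length := lt_of_lt_of_le hlen (Nat.min_le_left _ _)
        have him : i < minLen (s :: ss) := lt_of_lt_of_le hlen (Nat.min_le_right _ _)
        simp only [List.getElem_map, List.getElem_zip, List.getElem_range, colLabel,
          List.all_cons, minLen_cons_cons]
        rw [List.getD_eq_getElem _ _ hir]
        by_cases hx : r[i] == "S" <;>
          by_cases hall : (s :: ss).all (fun row => row.getD i "" == "S") = true <;>
            simp_all

theorem B_eq (data : List (List String)) :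
    get_veracity_labels_alt data = (List.range (minLen data)).map (colLabel data) := by
  unfold get_veracity_labels_alt
  rw [List.foldl_reverse]
  cases data with
  | nil => simp [minLen]
  | cons r rs => rw [B_foldr (r :: rs) (by simp)]; rfl

-- ===== VERDICT (by name: the statement is the Claim_ definition above) =====
theorem get_veracity_labels_spec : Claim_equal_get_veracity_labels := by
  intro data _
  unfold Spec_get_veracity_labels
  rw [A_eq, B_eq]
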